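-- pv_equiv track=rewrite | github.com/antoniojsp/challenges | Leetcode/python/sol1805.py | numDifferentIntegers
-- ===== SOURCE A (Python) =====
-- def numDifferentIntegers(word: str) -> int:
--     word = list(word)
--     for i in range(len(word)):
--         if not word[i].isdigit():
--             word[i ] =" "
--     word = "".join(word)
--     word = word.split()
--     return len(set(int(i) for i in word))
-- ===== SOURCE B (Python) =====
-- def numDifferentIntegers(word: str) -> int:
--     # Single left-to-right scan extracting maximal digit runs directly
--     # (no masking/join/split pass); the set of their int values is built incrementally.
--     seen = set()
--     i = 0
--     n = len(word)
--     while i < n: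
--         if word[i].isdigit():
--             j = i
--             while j < n and word[j].isdigit():
--                 j += 1
--             seen.add(int(word[i:j]))
--             i = j
--         else:
--             i += 1
--     return len(seen)
-- ===== Notes on version B (the rewrite author's own statement) =====
-- stated objective: alternative
-- what changed: Replaces A's three-pass pipeline (mask non-digits to spaces, join, split, set-comprehension of ints) by a single left-to-right scan that extracts each maximal digit run in place and adds its int value to the set incrementally.
import Mathlib
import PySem

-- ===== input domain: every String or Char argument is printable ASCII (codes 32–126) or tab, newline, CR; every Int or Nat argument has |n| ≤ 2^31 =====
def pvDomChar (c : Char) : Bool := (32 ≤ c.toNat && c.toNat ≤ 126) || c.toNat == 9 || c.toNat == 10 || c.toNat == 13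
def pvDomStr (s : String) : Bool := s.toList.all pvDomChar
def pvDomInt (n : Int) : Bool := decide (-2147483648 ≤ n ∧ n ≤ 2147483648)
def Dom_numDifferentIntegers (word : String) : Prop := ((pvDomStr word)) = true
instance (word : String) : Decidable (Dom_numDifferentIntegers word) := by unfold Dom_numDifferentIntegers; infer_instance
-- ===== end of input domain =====

-- B replaces A's mask-join-split pipeline by a single scan extracting maximal digit runs; same cost, different structure (return-value equivalence, proved total).


-- ===== PORT A =====
-- mask every non-digit character to ' ' (the in-place loop over list(word));
-- word[i].isdigit() on a one-character string is PySem.Chars.isdigit of that character.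
def numDifferentIntegers (word : String) : Int :=
  -- masked = the in-place loop; split₀ = "".join(...).split();
  -- int(i): every token is a nonempty digit run, so ofChars? is always `some`; the getD 0 default is unreachable
  ((PySem.Set.ofList
      ((PySem.Chars.split₀
          (word.toList.map (fun c => if PySem.Chars.isdigit c then c else ' '))).map
        (fun t => (PySem.Int.ofChars? t).getD 0))).length : Int)

-- ===== PORT B =====
-- the outer while-loop of Source B: on a digit, the inner while advances j to the run's end
-- (takeWhile/dropWhile of the digit run), adds int(word[i:j]) to the set, resumes at j.
def pvAltGo (cs : List Char) (seen : PySem.Set Int) : PySem.Set Int :=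
  match cs with
  | [] => seen
  | c :: rest =>
    if PySem.Chars.isdigit c then
      pvAltGo ((c :: rest).dropWhile PySem.Chars.isdigit)
        (PySem.Set.add seen ((PySem.Int.ofChars? ((c :: rest).takeWhile PySem.Chars.isdigit)).getD 0))
    else pvAltGo rest seen
  termination_by cs.length
  decreasing_by
  · simp only [List.dropWhile_cons, *, if_pos]
    exact Nat.lt_succ_of_le (List.length_dropWhile_le _ _)
  · simp

def numDifferentIntegers_alt (word : String) : Int :=
  ((pvAltGo word.toList PySem.Set.empty).length : Int)

-- ===== PRECONDITION & SPEC =====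
def Spec_numDifferentIntegers (word : String) (out : Int) : Prop := out = numDifferentIntegers_alt word
instance (word : String) (out : Int) : Decidable (Spec_numDifferentIntegers word out) := by unfold Spec_numDifferentIntegers; infer_instance

-- ===== CLAIM (what is proved, stated in full; the proofs are below) =====
def Claim_equal_numDifferentIntegers : Prop := ∀ (word : String), Dom_numDifferentIntegers word → Spec_numDifferentIntegers word (numDifferentIntegers word)

-- ===== LEMMAS AND PROOFS =====

-- the list of maximal digit runs of cs, left to right
def pvRuns (cs : List Char) : List (List Char) :=
  match cs with
  | [] => []
  | c :: rest =>
    if PySem.Chars.isdigit c then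
      ((c :: rest).takeWhile PySem.Chars.isdigit) :: pvRuns ((c :: rest).dropWhile PySem.Chars.isdigit)
    else pvRuns rest
  termination_by cs.length
  decreasing_by
  · simp only [List.dropWhile_cons, *, if_pos]
    exact Nat.lt_succ_of_le (List.length_dropWhile_le _ _)
  · simp

theorem pv_isspace_of_isdigit (c : Char) (h : PySem.Chars.isdigit c = true) :
    PySem.Chars.isspace c = false := by
  simp only [PySem.Chars.isdigit, Bool.and_eq_true, decide_eq_true_eq, Char.le_def] at h
  have h48 : 48 ≤ c.val.toNat := by simpa using UInt32.le_iff_toNat_le.mp h.1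
  have h57 : c.val.toNat ≤ 57 := by simpa using UInt32.le_iff_toNat_le.mp h.2
  simp only [PySem.Chars.isspace, Bool.or_eq_false_iff, Bool.and_eq_false_iff,
    decide_eq_false_iff_not, Char.toNat]
  omega

theorem pv_altGo_eq (cs : List Char) :
    ∀ seen, pvAltGo cs seen =
      (pvRuns cs).foldl (fun s t => PySem.Set.add s ((PySem.Int.ofChars? t).getD 0)) seen := by
  induction cs using pvRuns.induct with
  | case1 => intro seen; simp [pvAltGo, pvRuns]
  | case2 c rest h ih =>
      intro seen
      rw [pvAltGo, pvRuns]
      simp only [h, if_pos, List.foldl_cons]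
      exact ih _
  | case3 c rest h ih =>
      intro seen
      rw [pvAltGo, pvRuns]
      simp only [h, Bool.false_eq_true, reduceIte]
      exact ih seen

-- a pending (already reversed) nonempty digit prefix p followed by the rest of the input
def pvConsRun (p : List Char) (l : List Char) : List (List Char) :=
  (p ++ l.takeWhile PySem.Chars.isdigit) :: pvRuns (l.dropWhile PySem.Chars.isdigit)

theorem pv_split_go (l : List Char) :
    ∀ (cur : List Char) (acc : List (List Char)),
      PySem.Chars.split₀.go (l.map (fun c => if PySem.Chars.isdigit c then c else ' ')) cur acc
        = acc.reverse ++ (if cur.isEmpty then pvRuns l else pvConsRun cur.reverse l) := by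
  induction l with
  | nil =>
      intro cur acc
      cases cur with
      | nil => simp [PySem.Chars.split₀.go, pvRuns]
      | cons x xs => simp [PySem.Chars.split₀.go, pvConsRun, pvRuns]
  | cons c rest ih =>
      intro cur acc
      by_cases hd : PySem.Chars.isdigit c = true
      · -- masked char is c itself, a digit, not a space: push onto cur
        simp only [List.map_cons, hd, if_pos, PySem.Chars.split₀.go,
          pv_isspace_of_isdigit c hd, Bool.false_eq_true, reduceIte]
        rw [ih (c :: cur) acc]
        simp only [List.isEmpty_cons, List.reverse_cons]
        cases cur with
        | nil =>
            simp only [List.isEmpty_nil, if_pos, List.reverse_nil, List.nil_append]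
            rw [pvRuns]
            simp [hd, pvConsRun]
        | cons x xs =>
            simp only [List.isEmpty_cons, reduceIte, pvConsRun, List.reverse_cons,
              List.takeWhile_cons, List.dropWhile_cons, hd, if_pos]
            simp
      · -- masked char is ' ': flush cur
        have hsp : PySem.Chars.isspace ' ' = true := by decide
        simp only [List.map_cons, hd, Bool.false_eq_true, reduceIte, PySem.Chars.split₀.go, hsp,
          if_pos]
        cases cur with
        | nil =>
            simp only [List.isEmpty_nil, reduceIte]
            rw [ih [] acc]
            simp only [List.isEmpty_nil, reduceIte]
            rw [pvRuns]
            simp [hd]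
        | cons x xs =>
            simp only [List.isEmpty_cons]
            rw [ih [] ((x :: xs).reverse :: acc)]
            simp only [List.isEmpty_nil, reduceIte, List.reverse_cons, pvConsRun,
              List.takeWhile_cons, List.dropWhile_cons, hd, Bool.false_eq_true]
            rw [pvRuns]
            simp [hd]

theorem pv_split_masked (l : List Char) :
    PySem.Chars.split₀ (l.map (fun c => if PySem.Chars.isdigit c then c else ' ')) = pvRuns l := by
  have := pv_split_go l [] []
  simpa [PySem.Chars.split₀] using this

-- ===== VERDICT (by name: the statement is the Claim_ definition above) =====
theorem numDifferentIntegers_spec : Claim_equal_numDifferentIntegers := by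
  intro word _
  unfold Spec_numDifferentIntegers numDifferentIntegers numDifferentIntegers_alt
  rw [pv_split_masked, pv_altGo_eq, PySem.Set.ofList_eq_foldl, List.foldl_map]
  rfl
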